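-- pv_equiv track=rewrite | github.com/Mty0201/sbf-net | scripts/agent/summarize_train_log.py | infer_metric_direction
-- ===== SOURCE A (Python) =====
-- LOWER_IS_BETTER_TOKENS = ("loss", "error")
--
-- HIGHER_IS_BETTER_TOKENS = ("miou", "macc", "allacc", "acc", "accuracy", "cosine", "cover")
--
-- NEUTRAL_METRIC_TOKENS = ("ratio", "mean", "lr", "data", "batch", "remain", "steps")
--
-- def infer_metric_direction(metric_name: str) -> str:
--     name = metric_name.lower()
--     if any(token in name for token in NEUTRAL_METRIC_TOKENS):
--         return "neutral"
--     if any(token in name for token in LOWER_IS_BETTER_TOKENS):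
--         return "lower_is_better"
--     if any(token in name for token in HIGHER_IS_BETTER_TOKENS):
--         return "higher_is_better"
--     return "unknown"
-- ===== SOURCE B (Python) =====
-- LOWER_IS_BETTER_TOKENS = ("loss", "error")
--
-- HIGHER_IS_BETTER_TOKENS = ("miou", "macc", "allacc", "acc", "accuracy", "cosine", "cover")
--
-- NEUTRAL_METRIC_TOKENS = ("ratio", "mean", "lr", "data", "batch", "remain", "steps")
--
-- # priority of each token: 0 = neutral beats 1 = lower beats 2 = higher; 3 = no match
-- _PRIO = (
--     ("ratio", 0), ("mean", 0), ("lr", 0), ("data", 0), ("batch", 0), ("remain", 0), ("steps", 0),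
--     ("loss", 1), ("error", 1),
--     ("miou", 2), ("macc", 2), ("allacc", 2), ("acc", 2), ("accuracy", 2), ("cosine", 2), ("cover", 2),
-- )
-- _RESULTS = ("neutral", "lower_is_better", "higher_is_better", "unknown")
--
-- def infer_metric_direction(metric_name: str) -> str:
--     # Single left-to-right walk over the lowered name: at each suffix, lower the
--     # best (minimum) priority by any token that starts there; no substring scans.
--     s = metric_name.lower()
--     best = 3
--     while s:
--         for token, p in _PRIO:
--             if p < best and s.startswith(token):
--                 best = p
--         s = s[1:]
--     return _RESULTS[best]
-- ===== Notes on version B (the rewrite author's own statement) =====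
-- stated objective: alternative
-- what changed: Instead of three sequential any(token in name) substring scans per category, B walks the lowered name once left to right, maintaining the minimum priority of any token that starts at each position, and indexes a result table at the end.
import Mathlib
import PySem

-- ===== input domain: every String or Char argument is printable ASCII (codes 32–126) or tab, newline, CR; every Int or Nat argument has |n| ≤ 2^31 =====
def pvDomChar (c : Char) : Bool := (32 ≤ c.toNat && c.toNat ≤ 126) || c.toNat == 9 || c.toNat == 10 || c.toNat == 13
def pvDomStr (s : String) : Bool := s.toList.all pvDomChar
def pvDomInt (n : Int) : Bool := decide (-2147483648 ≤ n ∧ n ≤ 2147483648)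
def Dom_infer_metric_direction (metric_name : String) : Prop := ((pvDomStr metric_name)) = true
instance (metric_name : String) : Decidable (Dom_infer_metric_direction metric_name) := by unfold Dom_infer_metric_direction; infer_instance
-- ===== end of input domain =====

-- B replaces A's three sequential any(token in name) substring scans with one
-- left-to-right walk over the lowered name that keeps the minimum priority of any
-- token starting at each position (objective: alternative).


-- ===== PORT A =====
def pvLowerTokens : List String := ["loss", "error"]
def pvHigherTokens : List String := ["miou", "macc", "allacc", "acc", "accuracy", "cosine", "cover"]
def pvNeutralTokens : List String := ["ratio", "mean", "lr", "data", "batch", "remain", "steps"]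

def infer_metric_direction (metric_name : String) : String :=
  let name := PySem.Str.lower metric_name
  if pvNeutralTokens.any (fun token => PySem.Str.isIn token name) then "neutral"
  else if pvLowerTokens.any (fun token => PySem.Str.isIn token name) then "lower_is_better"
  else if pvHigherTokens.any (fun token => PySem.Str.isIn token name) then "higher_is_better"
  else "unknown"

-- ===== PORT B =====
def pvPrioTable : List (String × Nat) :=
  [("ratio", 0), ("mean", 0), ("lr", 0), ("data", 0), ("batch", 0), ("remain", 0), ("steps", 0),
   ("loss", 1), ("error", 1),
   ("miou", 2), ("macc", 2), ("allacc", 2), ("acc", 2), ("accuracy", 2), ("cosine", 2), ("cover", 2)]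

def pvResults : List String := ["neutral", "lower_is_better", "higher_is_better", "unknown"]

-- the inner for-loop of Source B on the current suffix s (s.startswith on List Char)
def pvStep (s : List Char) (best : Nat) : Nat :=
  pvPrioTable.foldl
    (fun b tp => if tp.2 < b ∧ PySem.Chars.startswith s tp.1.toList = true then tp.2 else b) best

-- the while loop of Source B: s is consumed one character per iteration (s = s[1:])
def pvWalk : List Char → Nat → Nat
  | [], best => best
  | c :: rest, best => pvWalk rest (pvStep (c :: rest) best)

def infer_metric_direction_alt (metric_name : String) : String :=
  pvResults.getD (pvWalk (PySem.Str.lower metric_name).toList 3) "unknown"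

-- ===== PRECONDITION & SPEC =====
def Spec_infer_metric_direction (metric_name : String) (out : String) : Prop := out = infer_metric_direction_alt metric_name
instance (metric_name : String) (out : String) : Decidable (Spec_infer_metric_direction metric_name out) := by unfold Spec_infer_metric_direction; infer_instance

-- ===== CLAIM (what is proved, stated in full; the proofs are below) =====
def Claim_equal_infer_metric_direction : Prop := ∀ (metric_name : String), Dom_infer_metric_direction metric_name → Spec_infer_metric_direction metric_name (infer_metric_direction metric_name)

-- ===== LEMMAS AND PROOFS =====

-- min-fold over a token/priority list with an arbitrary Bool condition on the token
def pvCondFold (c : String → Bool) (l : List (String × Nat)) (b : Nat) : Nat :=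
  l.foldl (fun b tp => if c tp.1 then min b tp.2 else b) b

theorem pvCondFold_le (c : String → Bool) (l : List (String × Nat)) (b : Nat) :
    pvCondFold c l b ≤ b := by
  induction l generalizing b with
  | nil => simp [pvCondFold]
  | cons x xs ih =>
      simp only [pvCondFold, List.foldl] at *
      by_cases h : c x.1
      · simp only [h, if_pos]
        exact le_trans (ih _) (Nat.min_le_left _ _)
      · simp only [h, if_neg, Bool.false_eq_true, not_false_iff]
        exact ih b

theorem pvCondFold_init (c : String → Bool) (l : List (String × Nat)) (b t : Nat)
    (h : b ≤ t) : pvCondFold c l b = min b (pvCondFold c l t) := by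
  induction l generalizing b t with
  | nil => simp [pvCondFold]; omega
  | cons x xs ih =>
      simp only [pvCondFold, List.foldl] at *
      by_cases hc : c x.1
      · simp only [hc, if_pos]
        have h1 : min b x.2 ≤ min t x.2 := by omega
        have h2 := pvCondFold_le c xs (min t x.2)
        have h3 := ih (min b x.2) (min t x.2) h1
        simp only [pvCondFold] at h2 h3
        omega
      · simp only [hc, Bool.false_eq_true, if_neg, not_false_iff]
        exact ih b t h

-- pvStep's folder is the prefix-condition min-folder
theorem pvStep_eq (s : List Char) (best : Nat) :
    pvStep s best = pvCondFold (fun t => PySem.Chars.startswith s t.toList) pvPrioTable best := by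
  unfold pvStep pvCondFold
  congr 1
  funext b tp
  by_cases hs : PySem.Chars.startswith s tp.1.toList = true <;> by_cases hb : tp.2 < b <;>
    simp [hs, hb] <;> omega

-- a disjunctive condition splits the fold into a min of two folds
theorem pvCondFold_or (c1 c2 : String → Bool) (l : List (String × Nat)) (b : Nat) :
    pvCondFold (fun t => c1 t || c2 t) l b = min (pvCondFold c1 l b) (pvCondFold c2 l b) := by
  induction l generalizing b with
  | nil => simp [pvCondFold]
  | cons x xs ih =>
      simp only [pvCondFold, List.foldl] at *
      by_cases h1 : c1 x.1 <;> by_cases h2 : c2 x.1 <;> simp only [h1, h2, Bool.or_self,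
        Bool.or_false, Bool.false_or, if_pos, Bool.false_eq_true, if_neg,
        not_false_iff]
      · exact ih (min b x.2)
      · rw [ih (min b x.2)]
        have hB := pvCondFold_init c2 xs (min b x.2) b (Nat.min_le_left _ _)
        have hA := pvCondFold_le c1 xs (min b x.2)
        simp only [pvCondFold] at hB hA
        omega
      · rw [ih (min b x.2)]
        have hA := pvCondFold_init c1 xs (min b x.2) b (Nat.min_le_left _ _)
        have hB := pvCondFold_le c2 xs (min b x.2)
        simp only [pvCondFold] at hA hB
        omega
      · exact ih b

-- the walk computes the infix-condition min-fold over the whole (suffix) string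
theorem pvWalk_eq (cs : List Char) (best : Nat) :
    pvWalk cs best = pvCondFold (fun t => PySem.Chars.isIn t.toList cs) pvPrioTable best := by
  induction cs generalizing best with
  | nil =>
      unfold pvWalk pvCondFold pvPrioTable
      rw [PySem.List.foldl_congr_mem _ _ (fun b _ => b) best ?_]
      · simp
      · intro acc x hx
        fin_cases hx <;> rfl
  | cons c rest ih =>
      show pvWalk rest (pvStep (c :: rest) best) = _
      rw [ih, pvStep_eq]
      have hfun : (fun t : String => PySem.Chars.isIn t.toList (c :: rest))
          = (fun t : String => PySem.Chars.startswith (c :: rest) t.toList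
              || PySem.Chars.isIn t.toList rest) := by
        funext t
        rcases h : PySem.Chars.isIn t.toList (c :: rest) with _ | _
        · have hn := (PySem.Chars.isIn_eq_false_iff _ _).1 h
          rw [List.infix_cons_iff, not_or] at hn
          symm
          simp only [Bool.or_eq_false_iff]
          refine ⟨?_, ?_⟩
          · rw [← Bool.not_eq_true]
            intro hsw
            exact hn.1 ((PySem.Chars.startswith_iff _ _).1 hsw)
          · rw [← Bool.not_eq_true]
            intro hin
            exact hn.2 ((PySem.Chars.isIn_iff_infix _ _).1 hin)
        · have hy := (PySem.Chars.isIn_iff_infix _ _).1 h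
          rw [List.infix_cons_iff] at hy
          symm
          rcases hy with hp | hi
          · simp [(PySem.Chars.startswith_iff _ _).2 hp]
          · simp [(PySem.Chars.isIn_iff_infix _ _).2 hi]
      calc pvCondFold (fun t => PySem.Chars.isIn t.toList rest) pvPrioTable
              (pvCondFold (fun t => PySem.Chars.startswith (c :: rest) t.toList) pvPrioTable best)
          = min (pvCondFold (fun t => PySem.Chars.startswith (c :: rest) t.toList) pvPrioTable best)
              (pvCondFold (fun t => PySem.Chars.isIn t.toList rest) pvPrioTable best) := by
            exact pvCondFold_init _ _ _ _ (pvCondFold_le _ _ _)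
        _ = pvCondFold (fun t => PySem.Chars.startswith (c :: rest) t.toList
              || PySem.Chars.isIn t.toList rest) pvPrioTable best := by
            rw [pvCondFold_or]
        _ = pvCondFold (fun t => PySem.Chars.isIn t.toList (c :: rest)) pvPrioTable best := by
            rw [← hfun]

-- block lemma: the min-fold over one mapped token block is an any() test
theorem pvCondFold_block (toks : List String) (p : Nat) (c : String → Bool) (b : Nat) :
    pvCondFold c (toks.map (fun t => (t, p))) b = if toks.any c then min b p else b := by
  induction toks generalizing b with
  | nil => simp [pvCondFold]
  | cons t ts ih =>
      simp only [pvCondFold, List.map, List.foldl, List.any_cons] at *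
      by_cases hc : c t <;> simp only [hc, Bool.true_or, Bool.false_or, if_pos,
        Bool.false_eq_true, if_neg, not_false_iff]
      · rw [ih (min b p)]
        by_cases h : ts.any c = true <;> simp [h]
      · exact ih b

theorem pvPrioTable_blocks :
    pvPrioTable = pvNeutralTokens.map (fun t => (t, 0))
      ++ pvLowerTokens.map (fun t => (t, 1)) ++ pvHigherTokens.map (fun t => (t, 2)) := by
  decide

-- the whole-table fold as A's three any() tests
theorem pvCondFold_table (c : String → Bool) :
    pvCondFold c (pvNeutralTokens.map (fun t => (t, 0))
        ++ pvLowerTokens.map (fun t => (t, 1)) ++ pvHigherTokens.map (fun t => (t, 2))) 3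
      = if pvNeutralTokens.any c then 0
        else if pvLowerTokens.any c then 1
        else if pvHigherTokens.any c then 2 else 3 := by
  unfold pvCondFold
  rw [List.foldl_append, List.foldl_append]
  show pvCondFold c (pvHigherTokens.map (fun t => (t, 2)))
      (pvCondFold c (pvLowerTokens.map (fun t => (t, 1)))
        (pvCondFold c (pvNeutralTokens.map (fun t => (t, 0))) 3)) = _
  rw [pvCondFold_block, pvCondFold_block, pvCondFold_block]
  by_cases hn : pvNeutralTokens.any c <;> by_cases hl : pvLowerTokens.any c <;>
    by_cases hh : pvHigherTokens.any c <;> norm_num [hn, hl, hh]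

-- ===== VERDICT (by name: the statement is the Claim_ definition above) =====
theorem infer_metric_direction_spec : Claim_equal_infer_metric_direction := by
  intro metric_name _
  unfold Spec_infer_metric_direction infer_metric_direction infer_metric_direction_alt
  rw [pvWalk_eq, pvPrioTable_blocks, pvCondFold_table]
  simp only [PySem.Str.isIn_eq, PySem.Str.toList_lower]
  split_ifs <;> simp [pvResults]
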